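-- pv_equiv track=rewrite | github.com/youth4ever/orion | Project EULER/pb051 Prime digit replacements.py | index_duplicates
-- ===== SOURCE A (Python) =====
-- from itertools import combinations
-- from itertools import combinations
--
-- def index_duplicates(prime):
--     """
--     Returns all index combinations of all duplicate digits for a given prime; in the case that there are N indices
--     containing the same digit and N > 2, will include all combinations of indices with 2 to N members
--     :param prime: Prime number to be examined
--     :return: List of all combinations of duplicate digits in list form
--     """
--
--     string = str(prime)
--     dup_digits = []
--     indices_w_dup = []
--     combos = []
--     if len(string) == 2:
--         return [(0,), (1,)]
--     else:
--         for x in range(len(string)):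
--             digit = string[x]
--             if digit not in dup_digits:
--                 rest = string[:x] + string[x + 1:]
--                 if digit in rest:
--                     dup_digits.append(digit)
--                     indices_w_dup.append([x for x in range(len(string)) if string[x] == digit])
--         for group in indices_w_dup:
--             for r in range(1, len(group) + 1):
--                 for combination in combinations(group, r):
--                     combos.append(combination)
--         return combos
-- ===== SOURCE B (Python) =====
-- from itertools import combinations
--
-- def index_duplicates(prime):
--     """Same result as A: all index combinations of duplicated digits of prime."""
--     string = str(prime)
--     if len(string) == 2:
--         return [(0,), (1,)]
--     groups = {}
--     for i in range(len(string)):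
--         ch = string[i]
--         groups[ch] = groups.get(ch, []) + [i]
--     combos = []
--     for group in groups.values():
--         if len(group) >= 2:
--             for r in range(1, len(group) + 1):
--                 combos.extend(combinations(group, r))
--     return combos
-- ===== Notes on version B (the rewrite author's own statement) =====
-- stated objective: simpler
-- what changed: B replaces A's per-position membership test against dup_digits, slice-and-rescan rest check and per-digit index comprehension by a single pass that builds a dict mapping each digit to its index list, then emits combinations for the groups of length >= 2.
import Mathlib
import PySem

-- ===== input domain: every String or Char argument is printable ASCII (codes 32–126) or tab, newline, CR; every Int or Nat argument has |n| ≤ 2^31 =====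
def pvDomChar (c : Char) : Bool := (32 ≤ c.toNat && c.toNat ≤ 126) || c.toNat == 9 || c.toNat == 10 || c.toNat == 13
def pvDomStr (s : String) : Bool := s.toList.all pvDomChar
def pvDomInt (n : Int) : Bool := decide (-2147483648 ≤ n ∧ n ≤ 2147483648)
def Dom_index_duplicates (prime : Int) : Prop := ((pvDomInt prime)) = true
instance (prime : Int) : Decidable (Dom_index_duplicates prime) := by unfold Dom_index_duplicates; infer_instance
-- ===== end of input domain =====

-- B replaces A's per-digit membership/slice scans by one grouping dict built in a single pass (simpler; same return value everywhere).

-- itertools.combinations(group, r), in itertools' lexicographic-by-index order (shared by both ports, as both Pythons call it)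
def pyCombinations : Nat → List Int → List (List Int)
  | 0, _ => [[]]
  | _ + 1, [] => []
  | r + 1, a :: as => (pyCombinations r as).map (fun t => a :: t) ++ pyCombinations (r + 1) as

-- ===== PORT A =====
-- str(prime) is ported to List Char (PySem.Int.toChars = (toStr).toList); string[x] with 0 ≤ x < len is s.getD x ' ' (in range,
-- so exact); string[:x] + string[x+1:] is s.take x ++ s.drop (x+1) (exact for 0 ≤ x < len).
def index_duplicates (prime : Int) : List (List Int) :=
  let s : List Char := PySem.Int.toChars prime
  if s.length = 2 then [[0], [1]]
  else
    -- state st = (dup_digits, indices_w_dup); the emission loop runs over indices_w_dup = st.2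
    ((List.range s.length).foldl
      (fun (st : List Char × List (List Int)) x =>
        let digit := s.getD x ' '
        if digit ∈ st.1 then st
        else
          let rest := s.take x ++ s.drop (x + 1)
          if digit ∈ rest then
            (st.1 ++ [digit],
             st.2 ++ [((List.range s.length).filter (fun i => s.getD i ' ' == digit)).map (fun i => (i : Int))])
          else st) ([], [])).2.foldl (fun combos group =>
      (PySem.List.pyRange 1 ((group.length : Int) + 1) 1).foldl (fun acc r =>
        acc ++ pyCombinations r.toNat group) combos) []

-- ===== PORT B =====
-- groups[ch] = groups.get(ch, []) + [i]  is  Dict.modify ch [] (· ++ [i]);  'for group in values: if len ≥ 2: extend …'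
-- is the filter+flatMap below.
def index_duplicates_alt (prime : Int) : List (List Int) :=
  let s : List Char := PySem.Int.toChars prime
  if s.length = 2 then [[0], [1]]
  else
    -- groups = the dict; its values() are consumed directly below
    (((List.range s.length).foldl
        (fun d i => d.modify (s.getD i ' ') [] (fun g => g ++ [(i : Int)])) PySem.Dict.empty).values.filter
      (fun g => 2 ≤ g.length)).flatMap (fun group =>
      (PySem.List.pyRange 1 ((group.length : Int) + 1) 1).flatMap (fun r =>
        pyCombinations r.toNat group))

-- ===== PRECONDITION & SPEC =====
def Spec_index_duplicates (prime : Int) (out : List (List Int)) : Prop := out = index_duplicates_alt prime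
instance (prime : Int) (out : List (List Int)) : Decidable (Spec_index_duplicates prime out) := by unfold Spec_index_duplicates; infer_instance

-- ===== CLAIM (what is proved, stated in full; the proofs are below) =====
def Claim_equal_index_duplicates : Prop := ∀ (prime : Int), Dom_index_duplicates prime → Spec_index_duplicates prime (index_duplicates prime)

-- ===== LEMMAS AND PROOFS =====

-- the index group of digit c in s, exactly as port A writes it
def grp (s : List Char) (c : Char) : List Int :=
  ((List.range s.length).filter (fun i => s.getD i ' ' == c)).map (fun i => (i : Int))

lemma map_getD_range (s : List Char) : (List.range s.length).map (fun i => s.getD i ' ') = s := by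
  apply List.ext_getElem
  · simp
  · intro i h1 h2
    simp only [List.getElem_map, List.getElem_range]
    rw [List.getD_eq_getElem?_getD, List.getElem?_eq_getElem (by simpa using h1)]
    rfl

lemma length_grp (s : List Char) (c : Char) : (grp s c).length = s.count c := by
  conv_rhs => rw [← map_getD_range s]
  rw [List.count_eq_countP, List.countP_map]
  show (((List.range s.length).filter (fun i => s.getD i ' ' == c)).map (fun i => (i : Int))).length = _
  rw [List.length_map, List.countP_eq_length_filter]
  simp [Function.comp_def]

-- B's dict values are the index groups of the distinct digits, in first-occurrence order
lemma values_groups (s : List Char) :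
    ((List.range s.length).foldl
      (fun d i => d.modify (s.getD i ' ') [] (fun g => g ++ [(i : Int)])) PySem.Dict.empty).values
    = (PySem.Set.ofList s).map (grp s) := by
  have hmap : (List.range s.length).foldl
      (fun d i => d.modify (s.getD i ' ') [] (fun g => g ++ [(i : Int)])) PySem.Dict.empty
      = ((List.range s.length).map (fun i => (s.getD i ' ', (i : Int)))).foldl
        (fun d p => d.modify p.1 [] (fun g => g ++ [p.2])) PySem.Dict.empty := by
    rw [List.foldl_map]
  have hkeys : ((List.range s.length).foldl
      (fun d i => d.modify (s.getD i ' ') [] (fun g => g ++ [(i : Int)])) PySem.Dict.empty).keys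
      = PySem.Set.ofList s := by
    rw [PySem.Dict.keys_foldl_modify_key, PySem.Dict.keys_empty, PySem.Set.update_nil_left,
      map_getD_range]
  have hnd : ((List.range s.length).foldl
      (fun d i => d.modify (s.getD i ' ') [] (fun g => g ++ [(i : Int)])) PySem.Dict.empty).keys.Nodup := by
    rw [hkeys]; exact PySem.Set.nodup_ofList s
  rw [PySem.Dict.values_eq_map_keys _ hnd [], hkeys]
  apply List.map_congr_left
  intro c hc
  rw [hmap, PySem.Dict.getD_foldl_modify_append]
  simp only [PySem.Dict.getD_empty, List.nil_append]
  rw [List.filter_map, List.map_map]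
  simp [grp, Function.comp_def, ← List.map_eq_flatMap]

lemma take_succ_getD (s : List Char) (k : Nat) (hk : k < s.length) :
    s.take (k + 1) = s.take k ++ [s.getD k ' '] := by
  rw [List.take_add_one, List.getElem?_eq_getElem hk]
  rw [List.getD_eq_getElem?_getD, List.getElem?_eq_getElem hk]
  rfl

lemma mem_rest_iff (s : List Char) (k : Nat) (hk : k < s.length) :
    s.getD k ' ' ∈ s.take k ++ s.drop (k + 1) ↔ 2 ≤ s.count (s.getD k ' ') := by
  have hget : s.getD k ' ' = s[k] := by
    rw [List.getD_eq_getElem?_getD, List.getElem?_eq_getElem hk]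
    rfl
  have hs : s.take k ++ s[k] :: s.drop (k + 1) = s := by
    conv_rhs => rw [← List.take_append_drop k s, List.drop_eq_getElem_cons hk]
  rw [hget, List.mem_append, ← List.count_pos_iff, ← List.count_pos_iff]
  generalize hd : s[k] = d at hs ⊢
  conv_rhs => rw [← hs]
  rw [List.count_append, List.count_cons_self]
  omega

-- A's loop invariant: after the first k positions, dup_digits is the first-occurrence-ordered
-- list of globally duplicated digits seen so far, and indices_w_dup its groups.
lemma A_loop (s : List Char) (k : Nat) (hk : k ≤ s.length) :
    (List.range k).foldl
      (fun (st : List Char × List (List Int)) x =>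
        let digit := s.getD x ' '
        if digit ∈ st.1 then st
        else
          let rest := s.take x ++ s.drop (x + 1)
          if digit ∈ rest then
            (st.1 ++ [digit],
             st.2 ++ [((List.range s.length).filter (fun i => s.getD i ' ' == digit)).map (fun i => (i : Int))])
          else st) ([], [])
    = (((PySem.Set.ofList (s.take k)).filter (fun c => 2 ≤ s.count c)),
       ((PySem.Set.ofList (s.take k)).filter (fun c => 2 ≤ s.count c)).map (grp s)) := by
  induction k with
  | zero => simp
  | succ k ih =>
    have hk' : k < s.length := by omega
    rw [List.range_succ, List.foldl_append, ih (by omega)]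
    simp only [List.foldl_cons, List.foldl_nil]
    have htake : s.take (k + 1) = s.take k ++ [s.getD k ' '] := take_succ_getD s k hk'
    have hofl : PySem.Set.ofList (s.take (k + 1))
        = PySem.Set.add (PySem.Set.ofList (s.take k)) (s.getD k ' ') := by
      rw [htake, PySem.Set.ofList_append_singleton]
    by_cases hmem : s.getD k ' ' ∈ (PySem.Set.ofList (s.take k)).filter (fun c => 2 ≤ s.count c)
    · rw [if_pos hmem]
      have hin : s.getD k ' ' ∈ PySem.Set.ofList (s.take k) := List.mem_of_mem_filter hmem
      rw [hofl, PySem.Set.add_of_mem hin]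
    · rw [if_neg hmem]
      by_cases hdup : 2 ≤ s.count (s.getD k ' ')
      · rw [if_pos ((mem_rest_iff s k hk').mpr hdup)]
        have hnotin : s.getD k ' ' ∉ PySem.Set.ofList (s.take k) := by
          intro h
          exact hmem (List.mem_filter.mpr ⟨h, by simpa using hdup⟩)
        rw [hofl, PySem.Set.add_of_not_mem hnotin, List.filter_append]
        simp only [List.filter_cons, List.filter_nil]
        rw [if_pos (by simpa using hdup)]
        rw [List.map_append]
        rfl
      · rw [if_neg (fun h => hdup ((mem_rest_iff s k hk').mp h))]
        have hsame : (PySem.Set.ofList (s.take (k + 1))).filter (fun c => 2 ≤ s.count c)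
            = (PySem.Set.ofList (s.take k)).filter (fun c => 2 ≤ s.count c) := by
          rw [hofl, PySem.Set.add_eq_ite]
          split_ifs with h
          · rfl
          · rw [List.filter_append]
            simp only [List.filter_cons, List.filter_nil]
            rw [if_neg (by simpa using hdup)]
            simp
        rw [hsame]

-- both emission loops flatten the same list of groups the same way
lemma emit_eq (gs : List (List Int)) :
    gs.foldl (fun combos group =>
      (PySem.List.pyRange 1 ((group.length : Int) + 1) 1).foldl (fun acc r =>
        acc ++ pyCombinations r.toNat group) combos) []
    = gs.flatMap (fun group =>
      (PySem.List.pyRange 1 ((group.length : Int) + 1) 1).flatMap (fun r =>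
        pyCombinations r.toNat group)) := by
  have h : ∀ (combos : List (List Int)) (group : List Int),
      (PySem.List.pyRange 1 ((group.length : Int) + 1) 1).foldl (fun acc r =>
        acc ++ pyCombinations r.toNat group) combos
      = combos ++ (PySem.List.pyRange 1 ((group.length : Int) + 1) 1).flatMap (fun r =>
        pyCombinations r.toNat group) := by
    intro combos group
    exact PySem.List.foldl_append_eq_flatMap ..
  calc gs.foldl (fun combos group =>
      (PySem.List.pyRange 1 ((group.length : Int) + 1) 1).foldl (fun acc r =>
        acc ++ pyCombinations r.toNat group) combos) []
      = gs.foldl (fun combos group =>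
          combos ++ (PySem.List.pyRange 1 ((group.length : Int) + 1) 1).flatMap (fun r =>
            pyCombinations r.toNat group)) [] := by simp only [h]
    _ = _ := by rw [PySem.List.foldl_append_eq_flatMap]; simp

-- ===== VERDICT (by name: the statement is the Claim_ definition above) =====
theorem index_duplicates_spec : Claim_equal_index_duplicates := by
  unfold Claim_equal_index_duplicates Spec_index_duplicates
  intro prime _
  unfold index_duplicates index_duplicates_alt
  by_cases h2 : (PySem.Int.toChars prime).length = 2
  · rw [if_pos h2, if_pos h2]
  · rw [if_neg h2, if_neg h2]
    set s := PySem.Int.toChars prime with hs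
    rw [A_loop s s.length (le_refl _), List.take_length]
    rw [values_groups s, List.filter_map]
    have hpred : (PySem.Set.ofList s).filter ((fun g => decide (2 ≤ g.length)) ∘ grp s)
        = (PySem.Set.ofList s).filter (fun c => 2 ≤ s.count c) := by
      apply List.filter_congr
      intro c hc
      simp [length_grp]
    rw [hpred, emit_eq]
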